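-- pv_equiv track=rewrite | github.com/eliottcassidy2000/math | 04-computation/verify_all_claims.py | build_paley
-- ===== SOURCE A (Python) =====
-- def quadratic_residues(p):
--     return {(k*k) % p for k in range(1, p)} - {0}
--
-- def build_paley(p):
--     qr = quadratic_residues(p)
--     T = [[0]*p for _ in range(p)]
--     for i in range(p):
--         for j in range(p):
--             if i != j and (j - i) % p in qr:
--                 T[i][j] = 1
--     return T
-- ===== SOURCE B (Python) =====
-- def quadratic_residues(p):
--     return {(k*k) % p for k in range(1, p)} - {0}
--
-- def build_paley(p):
--     qr = quadratic_residues(p)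
--     base = [1 if k in qr else 0 for k in range(p)]
--     return [base[-i:] + base[:-i] for i in range(p)]
-- ===== Notes on version B (the rewrite author's own statement) =====
-- stated objective: faster
-- what changed: B exploits that the Paley matrix is circulant: it builds a single indicator row of the quadratic residues once and produces every row as a cyclic rotation of it via slicing, replacing the per-cell nested membership loop.
import Mathlib
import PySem

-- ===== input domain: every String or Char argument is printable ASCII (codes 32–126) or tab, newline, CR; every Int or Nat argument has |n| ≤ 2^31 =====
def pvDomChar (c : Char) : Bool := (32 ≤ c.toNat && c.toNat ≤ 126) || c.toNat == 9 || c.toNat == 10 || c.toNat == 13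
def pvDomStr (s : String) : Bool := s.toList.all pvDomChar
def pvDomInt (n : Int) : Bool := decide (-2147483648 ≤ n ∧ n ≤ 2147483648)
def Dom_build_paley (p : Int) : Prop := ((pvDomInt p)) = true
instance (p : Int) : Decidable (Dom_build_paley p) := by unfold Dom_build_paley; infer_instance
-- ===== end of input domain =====

-- B builds the circulant Paley matrix by rotating one indicator row with slices instead of A's per-cell nested membership loop.

-- ===== PORT A =====
def quadratic_residues (p : Int) : PySem.Set Int :=
  PySem.Set.diff
    (PySem.Set.ofList ((PySem.List.pyRange 1 p 1).map (fun k => PySem.Int.mod (k * k) p)))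
    (PySem.Set.ofList [0])

def build_paley (p : Int) : List (List Int) :=
  let qr := quadratic_residues p
  let T : List (List Int) := (PySem.List.pyRange 0 p 1).map (fun _ => List.replicate p.toNat 0)
  (PySem.List.pyRange 0 p 1).foldl (fun T i =>
    (PySem.List.pyRange 0 p 1).foldl (fun T j =>
      if (i != j) && PySem.Set.contains qr (PySem.Int.mod (j - i) p) then
        PySem.List.pySetD T i (PySem.List.pySetD (PySem.List.pyGetD T i []) j 1)
      else T) T) T

-- ===== PORT B =====
def build_paley_alt (p : Int) : List (List Int) :=
  let qr := quadratic_residues p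
  let base : List Int :=
    (PySem.List.pyRange 0 p 1).map (fun k => if PySem.Set.contains qr k then 1 else 0)
  (PySem.List.pyRange 0 p 1).map (fun i =>
    PySem.List.slice base (some (-i)) none ++ PySem.List.slice base none (some (-i)))

-- ===== PRECONDITION & SPEC =====
def Spec_build_paley (p : Int) (out : List (List Int)) : Prop := out = build_paley_alt p
instance (p : Int) (out : List (List Int)) : Decidable (Spec_build_paley p out) := by unfold Spec_build_paley; infer_instance

-- ===== CLAIM (what is proved, stated in full; the proofs are below) =====
def Claim_equal_build_paley : Prop := ∀ (p : Int), Dom_build_paley p → Spec_build_paley p (build_paley p)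

-- ===== LEMMAS AND PROOFS =====

-- writing a position's own value back is the identity (also out of range, where pySetD is the identity)
lemma pySetD_pyGetD_self {α : Type} (xs : List α) (i : Int) (d : α) (h0 : 0 ≤ i) :
    PySem.List.pySetD xs i (PySem.List.pyGetD xs i d) = xs := by
  by_cases h : i < xs.length
  · rw [PySem.List.pyGetD_eq_getElem xs d h0 h, PySem.List.pySetD_of_nonneg xs _ h0]
    exact List.set_getElem_self (by omega)
  · rw [PySem.List.pySetD_of_nonneg xs _ h0]
    exact List.set_eq_of_length_le (by omega)

-- a fold over range(a, a+m) that rewrites each position j once, on a list whose tail is still all z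
lemma setfold {α : Type} (g : Int → α → α) (z : α) :
    ∀ (m : Nat) (a : Int) (pre : List α), 0 ≤ a → pre.length = a.toNat →
    (PySem.List.pyRange a (a + m) 1).foldl
      (fun l j => PySem.List.pySetD l j (g j (PySem.List.pyGetD l j z))) (pre ++ List.replicate m z)
    = pre ++ (PySem.List.pyRange a (a + m) 1).map (fun j => g j z) := by
  intro m
  induction m with
  | zero => intro a pre _ _; simp [PySem.List.pyRange_one_eq_nil (le_refl a)]
  | succ m ih =>
    intro a pre ha hlen
    have hcons : PySem.List.pyRange a (a + (m+1 : Nat)) 1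
        = a :: PySem.List.pyRange (a+1) (a + (m+1 : Nat)) 1 :=
      PySem.List.pyRange_one_cons (by push_cast; omega)
    rw [hcons]
    have hget : PySem.List.pyGetD (pre ++ List.replicate (m+1) z) a z = z := by
      rw [PySem.List.pyGetD_eq_getElem _ z ha (by simp; omega)]
      rw [List.getElem_append_right (by omega)]
      simp [hlen]
    have hset : PySem.List.pySetD (pre ++ List.replicate (m+1) z) a (g a z)
        = (pre ++ [g a z]) ++ List.replicate m z := by
      rw [PySem.List.pySetD_of_nonneg _ _ ha]
      simp [hlen, List.replicate_succ]
    simp only [List.foldl_cons, hget, hset]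
    have h2 : a + ((m:Int)+1) = (a+1) + m := by ring
    have := ih (a+1) (pre ++ [g a z]) (by omega) (by simp [hlen]; omega)
    push_cast at this ⊢
    rw [h2, this]
    simp

-- the inner matrix loop of A only rewrites row i
lemma matrix_inner (c : Int → Bool) :
    ∀ (js : List Int) (T : List (List Int)) (i : Int), 0 ≤ i →
    js.foldl (fun T j => if c j then
        PySem.List.pySetD T i (PySem.List.pySetD (PySem.List.pyGetD T i []) j 1) else T) T
    = PySem.List.pySetD T i
        (js.foldl (fun r j => if c j then PySem.List.pySetD r j 1 else r)
          (PySem.List.pyGetD T i [])) := by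
  intro js
  induction js with
  | nil => intro T i hi; simp [pySetD_pyGetD_self T i [] hi]
  | cons j js ih =>
    intro T i hi
    simp only [List.foldl_cons]
    by_cases hc : c j
    · simp only [hc, if_true]
      by_cases hr : i < T.length
      · set r' : List Int := PySem.List.pySetD (PySem.List.pyGetD T i []) j 1 with hr'
        have hTset : PySem.List.pySetD T i r' = T.set i.toNat r' := PySem.List.pySetD_of_nonneg T _ hi
        have hget' : PySem.List.pyGetD (PySem.List.pySetD T i r') i [] = r' := by
          rw [hTset, PySem.List.pyGetD_eq_getElem _ [] hi (by rw [List.length_set]; exact hr)]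
          exact List.getElem_set_self (by rw [List.length_set]; omega)
        rw [ih _ i hi, hget']
        rw [hTset, PySem.List.pySetD_of_nonneg _ _ hi, PySem.List.pySetD_of_nonneg _ _ hi,
          List.set_set]
      · have hid : ∀ v : List Int, PySem.List.pySetD T i v = T := by
          intro v; rw [PySem.List.pySetD_of_nonneg _ _ hi]
          exact List.set_eq_of_length_le (by omega)
        have hgetnil : PySem.List.pyGetD T i ([] : List Int) = [] := by
          apply PySem.List.pyGetD_of_none
          rw [PySem.List.pyGet?_eq_none_iff]
          unfold PySem.Raise.InRange
          omega
        rw [hid]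
        rw [ih _ i hi]
        rw [hid]
        rw [hid]
    · simp only [hc]
      exact ih T i hi

-- A's nested per-cell loops compute the matrix of guarded cell values
lemma loops_eq (c : Int → Int → Bool) (n : Nat) :
    (PySem.List.pyRange 0 (n:Int) 1).foldl (fun T i =>
      (PySem.List.pyRange 0 (n:Int) 1).foldl (fun T j =>
        if c i j then PySem.List.pySetD T i (PySem.List.pySetD (PySem.List.pyGetD T i []) j 1)
        else T) T)
      (List.replicate n (List.replicate n 0))
    = (PySem.List.pyRange 0 (n:Int) 1).map (fun i =>
        (PySem.List.pyRange 0 (n:Int) 1).map (fun j => if c i j then (1:Int) else 0)) := by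
  rw [PySem.List.foldl_congr_mem _ _
    (fun acc i => PySem.List.pySetD acc i
      ((fun i x => (PySem.List.pyRange 0 (n:Int) 1).foldl
          (fun r j => if c i j then PySem.List.pySetD r j 1 else r) x) i
        (PySem.List.pyGetD acc i (List.replicate n (0:Int))))) _ ?_]
  · have hs := setfold (fun i x => (PySem.List.pyRange 0 (n:Int) 1).foldl
        (fun r j => if c i j then PySem.List.pySetD r j 1 else r) x)
        (List.replicate n (0:Int)) n 0 [] (le_refl 0) rfl
    simp only [zero_add, List.nil_append] at hs
    rw [hs]
    apply List.map_congr_left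
    intro i _
    rw [PySem.List.foldl_congr_mem _ _
      (fun r j => PySem.List.pySetD r j
        ((fun j x => if c i j then (1:Int) else x) j (PySem.List.pyGetD r j 0))) _ ?_]
    · have hs2 := setfold (fun j x => if c i j then (1:Int) else x) (0:Int) n 0 [] (le_refl 0) rfl
      simp only [zero_add, List.nil_append] at hs2
      rw [hs2]
    · intro acc j hj
      have hj0 : 0 ≤ j := (PySem.List.mem_pyRange_one.mp hj).1
      by_cases hc : c i j
      · simp [hc]
      · simp only [hc, Bool.false_eq_true, if_false]
        exact (pySetD_pyGetD_self acc j 0 hj0).symm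
  · intro acc i hi
    have hi0 : 0 ≤ i := (PySem.List.mem_pyRange_one.mp hi).1
    rw [matrix_inner (c i) _ acc i hi0]
    dsimp only
    by_cases hacc : i < acc.length
    · rw [PySem.List.pyGetD_eq_getElem acc ([] : List Int) hi0 hacc,
        PySem.List.pyGetD_eq_getElem acc (List.replicate n (0:Int)) hi0 hacc]
    · have hid : ∀ v : List Int, PySem.List.pySetD acc i v = acc := by
        intro v; rw [PySem.List.pySetD_of_nonneg _ _ hi0]
        exact List.set_eq_of_length_le (by omega)
      rw [hid, hid]

-- 0 is never a quadratic residue in A's set (the '- {0}' difference)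
lemma qr_zero (p : Int) : PySem.Set.contains (quadratic_residues p) 0 = false := by
  simp [quadratic_residues, PySem.Set.diff, PySem.Set.contains, List.mem_filter]

-- B's rotated indicator row i equals A's row of guarded cell values
lemma rot_row (Q : Int → Bool) (hQ0 : Q 0 = false) (n i' : Nat) (hi : i' < n) :
    PySem.List.slice ((PySem.List.pyRange 0 (n:Int) 1).map (fun k => if Q k then (1:Int) else 0))
        (some (-(i':Int))) none
      ++ PySem.List.slice ((PySem.List.pyRange 0 (n:Int) 1).map (fun k => if Q k then (1:Int) else 0))
        none (some (-(i':Int)))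
    = (PySem.List.pyRange 0 (n:Int) 1).map
        (fun j => if ((i':Int) != j) && Q (PySem.Int.mod (j - (i':Int)) (n:Int)) then (1:Int) else 0) := by
  set base : List Int := (PySem.List.pyRange 0 (n:Int) 1).map (fun k => if Q k then (1:Int) else 0) with hbase
  have hblen : base.length = n := by simp [hbase, PySem.List.length_pyRange_one]
  have hbget : ∀ (m : Nat) (hm : m < n), base[m]'(by omega) = if Q ↑m then (1:Int) else 0 := by
    intro m hm
    simp only [hbase, List.getElem_map, PySem.List.getElem_pyRange_one]
    simp
  have hz : PySem.Int.mod 0 (n:Int) = 0 := by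
    rw [PySem.Int.mod_eq_emod_of_pos (by omega : (0:Int) < n)]; simp
  rcases Nat.eq_zero_or_pos i' with h0 | h0
  · subst h0
    have hc0 : (-((0:Nat):Int)) = 0 := by norm_num
    have e1 : PySem.List.slice base (some (-((0:Nat):Int))) none = base := by
      rw [hc0, PySem.List.slice_from base (le_refl (0:Int))]
      simp
    have e2 : PySem.List.slice base none (some (-((0:Nat):Int))) = [] := by
      rw [hc0, PySem.List.slice_to base (le_refl (0:Int))]
      simp
    rw [e1, e2, List.append_nil, hbase]
    apply List.map_congr_left
    intro k hk
    obtain ⟨hk0, hkn⟩ := PySem.List.mem_pyRange_one.mp hk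
    by_cases hk0' : k = 0
    · subst hk0'
      simp [hz, hQ0]
    · have hmod : PySem.Int.mod (k - ((0:Nat):Int)) (n:Int) = k := by
        rw [PySem.Int.mod_eq_emod_of_pos (by omega), Nat.cast_zero, sub_zero]
        exact Int.emod_eq_of_lt hk0 hkn
      have hne : (((0:Nat):Int) != k) = true := by simp; omega
      rw [hmod, hne]
      simp
  · rw [PySem.List.slice_from_neg_natCast base i' h0, PySem.List.slice_to_neg_natCast base i' h0,
      hblen]
    apply List.ext_getElem
    · simp [PySem.List.length_pyRange_one, hblen]
    · intro j h1 h2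
      have hjn : j < n := by
        simpa [PySem.List.length_pyRange_one, hblen] using h2
      rw [List.getElem_map, PySem.List.getElem_pyRange_one 0 (n:Int) j (by simpa using h2)]
      rw [zero_add]
      have hdl : (base.drop (n - i')).length = i' := by simp [hblen]; omega
      by_cases hlt : j < i'
      · rw [List.getElem_append_left (by omega : j < (base.drop (n - i')).length)]
        rw [List.getElem_drop]
        rw [hbget (n - i' + j) (by omega)]
        have hmod : PySem.Int.mod ((j:Int) - (i':Int)) (n:Int) = ((n - i' + j : Nat) : Int) := by
          rw [PySem.Int.mod_eq_emod_of_pos (by omega)]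
          have he : (j:Int) - (i':Int) = ((n - i' + j : Nat) : Int) - (n:Int) := by push_cast; omega
          rw [he, Int.sub_emod_right]
          exact Int.emod_eq_of_lt (by positivity) (by push_cast; omega)
        have hne : ((i':Int) != (j:Int)) = true := by simp; omega
        rw [hmod, hne]
        simp
      · rw [List.getElem_append_right (by omega : (base.drop (n - i')).length ≤ j)]
        simp only [hdl]
        rw [List.getElem_take]
        rw [hbget (j - i') (by omega)]
        have hmod : PySem.Int.mod ((j:Int) - (i':Int)) (n:Int) = ((j - i' : Nat) : Int) := by
          rw [PySem.Int.mod_eq_emod_of_pos (by omega)]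
          have he : (j:Int) - (i':Int) = ((j - i' : Nat) : Int) := by omega
          rw [he]
          exact Int.emod_eq_of_lt (by positivity) (by omega)
        rw [hmod]
        by_cases hij : j = i'
        · subst hij
          have : ((j - j : Nat) : Int) = 0 := by simp
          rw [this, hQ0]
          simp
        · have hne : ((i':Int) != (j:Int)) = true := by simp; omega
          rw [hne]
          simp

-- ===== VERDICT (by name: the statement is the Claim_ definition above) =====
theorem build_paley_spec : Claim_equal_build_paley := by
  intro p _
  unfold Spec_build_paley build_paley build_paley_alt
  by_cases hp : 0 < p
  · obtain ⟨n, rfl⟩ : ∃ n : Nat, p = ↑n := ⟨p.toNat, (Int.toNat_of_nonneg hp.le).symm⟩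
    dsimp only
    have hinit : (PySem.List.pyRange 0 (n:Int) 1).map
        (fun _ => List.replicate ((n:Int)).toNat (0:Int))
        = List.replicate n (List.replicate n 0) := by
      rw [List.map_const']
      simp [PySem.List.length_pyRange_one]
    rw [hinit]
    rw [loops_eq (fun i j => (i != j)
      && PySem.Set.contains (quadratic_residues ↑n) (PySem.Int.mod (j - i) ↑n)) n]
    apply List.map_congr_left
    intro i hi
    obtain ⟨hi0, hin⟩ := PySem.List.mem_pyRange_one.mp hi
    obtain ⟨i', rfl⟩ : ∃ i' : Nat, i = ↑i' := ⟨i.toNat, (Int.toNat_of_nonneg hi0).symm⟩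
    exact (rot_row (fun m => PySem.Set.contains (quadratic_residues ↑n) m)
      (qr_zero ↑n) n i' (by exact_mod_cast hin)).symm
  · have h0 : PySem.List.pyRange 0 p 1 = [] := PySem.List.pyRange_one_eq_nil (by omega)
    simp [h0]
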